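-- pv_equiv track=rewrite | github.com/xi-zhao/FluxQ | src/quantum_runtime/intent/markdown.py | parse_section_blocks
-- ===== SOURCE A (Python) =====
-- from collections import OrderedDict
--
-- def parse_section_blocks(body: str) -> OrderedDict[str, str]:
--     """Parse top-level markdown headings into named text blocks."""
--     sections: OrderedDict[str, str] = OrderedDict()
--     current_name: str | None = None
--     current_lines: list[str] = []
--
--     for line in body.splitlines():
--         if line.startswith("# "):
--             if current_name is not None:
--                 sections[current_name] = "\n".join(current_lines).strip()
--             current_name = line[2:].strip().lower()
--             current_lines = []
--             continue
--
--         current_lines.append(line)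
--
--     if current_name is not None:
--         sections[current_name] = "\n".join(current_lines).strip()
--
--     return sections
-- ===== SOURCE B (Python) =====
-- from collections import OrderedDict
--
--
-- def parse_section_blocks(body: str) -> "OrderedDict[str, str]":
--     """Parse top-level markdown headings into named text blocks.
--
--     Group-at-a-time decomposition: skip the prologue, then repeatedly take one
--     heading together with its content block and recurse on the remainder.
--     """
--     lines = body.splitlines()
--     while lines and not lines[0].startswith("# "):
--         lines = lines[1:]
--     sections: "OrderedDict[str, str]" = OrderedDict()
--     while lines:
--         name = lines[0][2:].strip().lower()
--         content, rest = _take_block(lines[1:])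
--         sections[name] = "\n".join(content).strip()
--         lines = rest
--     return sections
--
--
-- def _take_block(lines):
--     """Split off the content lines before the next heading."""
--     content = []
--     while lines and not lines[0].startswith("# "):
--         content.append(lines[0])
--         lines = lines[1:]
--     return content, lines
-- ===== Notes on version B (the rewrite author's own statement) =====
-- stated objective: alternative
-- what changed: Replaces A's single accumulator pass (pending name + growing line buffer flushed at each heading and at the end) by a group-at-a-time decomposition: skip the prologue, then repeatedly split off one heading and its content block and continue on the remainder.
import Mathlib
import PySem

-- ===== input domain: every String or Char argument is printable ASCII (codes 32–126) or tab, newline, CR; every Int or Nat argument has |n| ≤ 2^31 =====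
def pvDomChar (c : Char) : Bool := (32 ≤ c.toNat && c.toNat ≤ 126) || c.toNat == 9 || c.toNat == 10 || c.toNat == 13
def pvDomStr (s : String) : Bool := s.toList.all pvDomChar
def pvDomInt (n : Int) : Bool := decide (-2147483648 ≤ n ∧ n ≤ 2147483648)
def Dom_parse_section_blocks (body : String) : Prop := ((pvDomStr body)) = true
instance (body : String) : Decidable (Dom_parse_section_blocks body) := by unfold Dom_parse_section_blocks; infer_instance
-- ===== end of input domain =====

-- B replaces A's accumulator pass by a group-at-a-time decomposition (skip prologue,
-- then repeatedly split off one heading with its content block); alternative, not faster.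

-- ===== PORT A =====
-- A's single loop over the lines with state (sections, current_name, current_lines),
-- plus the final flush after the loop.
def pvA_loop : List String → PySem.Dict String String → Option String → List String →
    PySem.Dict String String
  | [], sections, currentName, currentLines =>
    match currentName with
    | some n => sections.insert n (PySem.Str.strip (PySem.Str.join "\n" currentLines))
    | none => sections
  | line :: rest, sections, currentName, currentLines =>
    if PySem.Str.startswith line "# " then
      let sections' :=
        match currentName with
        | some n => sections.insert n (PySem.Str.strip (PySem.Str.join "\n" currentLines))
        | none => sections
      pvA_loop rest sections' (some (PySem.Str.lower (PySem.Str.strip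
        (PySem.Str.slice line (some 2) none)))) []
    else
      pvA_loop rest sections currentName (currentLines ++ [line])

def parse_section_blocks (body : String) : List (String × String) :=
  (pvA_loop (PySem.Str.splitlines body) PySem.Dict.empty none []).items

-- ===== PORT B =====
-- _take_block: split off the content lines before the next heading.
def pvTakeBlock : List String → List String × List String
  | [] => ([], [])
  | line :: rest =>
    if PySem.Str.startswith line "# " then ([], line :: rest)
    else
      let (content, rest') := pvTakeBlock rest
      (line :: content, rest')

-- B's prologue skip: drop lines until the first heading.
def pvSkipPrologue : List String → List String
  | [] => []
  | line :: rest =>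
    if PySem.Str.startswith line "# " then line :: rest else pvSkipPrologue rest

theorem pvTakeBlock_eq (ls : List String) :
    pvTakeBlock ls = (ls.takeWhile (fun l => !(PySem.Str.startswith l "# ")),
      ls.dropWhile (fun l => !(PySem.Str.startswith l "# "))) := by
  induction ls with
  | nil => rfl
  | cons l rest ih =>
    simp only [pvTakeBlock, List.takeWhile, List.dropWhile, ih]
    cases h : PySem.Str.startswith l "# " <;> simp

-- B's main loop: one heading and its block per step.
def pvB_go : List String → PySem.Dict String String → PySem.Dict String String
  | [], sections => sections
  | line :: rest, sections =>
    let name := PySem.Str.lower (PySem.Str.strip (PySem.Str.slice line (some 2) none))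
    let p := pvTakeBlock rest
    pvB_go p.2 (sections.insert name (PySem.Str.strip (PySem.Str.join "\n" p.1)))
  termination_by ls _ => ls.length
  decreasing_by
    simp only [pvTakeBlock_eq]
    exact Nat.lt_succ_of_le (List.length_dropWhile_le _ _)

def parse_section_blocks_alt (body : String) : List (String × String) :=
  (pvB_go (pvSkipPrologue (PySem.Str.splitlines body)) PySem.Dict.empty).items

-- ===== PRECONDITION & SPEC =====
def Spec_parse_section_blocks (body : String) (out : List (String × String)) : Prop := out = parse_section_blocks_alt body
instance (body : String) (out : List (String × String)) : Decidable (Spec_parse_section_blocks body out) := by unfold Spec_parse_section_blocks; infer_instance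

-- ===== CLAIM (what is proved, stated in full; the proofs are below) =====
def Claim_equal_parse_section_blocks : Prop := ∀ (body : String), Dom_parse_section_blocks body → Spec_parse_section_blocks body (parse_section_blocks body)

-- ===== LEMMAS AND PROOFS =====

theorem pvSkipPrologue_eq (ls : List String) :
    pvSkipPrologue ls = ls.dropWhile (fun l => !(PySem.Str.startswith l "# ")) := by
  induction ls with
  | nil => rfl
  | cons l rest ih =>
    simp only [pvSkipPrologue, List.dropWhile, ih]
    cases h : PySem.Chars.startswith l.toList ['#', ' '] <;> simp [h]

-- A's loop with a pending section name equals B's loop after flushing that name with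
-- the buffered lines plus the content block that follows.
theorem pvA_loop_some (ls : List String) : ∀ (d : PySem.Dict String String)
    (n : String) (acc : List String),
    pvA_loop ls d (some n) acc =
      pvB_go (ls.dropWhile (fun l => !(PySem.Str.startswith l "# ")))
        (d.insert n (PySem.Str.strip (PySem.Str.join "\n"
          (acc ++ ls.takeWhile (fun l => !(PySem.Str.startswith l "# ")))))) := by
  induction ls with
  | nil => intro d n acc; simp [pvA_loop, pvB_go]
  | cons l rest ih =>
    intro d n acc
    by_cases h : PySem.Chars.startswith l.toList ['#', ' '] = true
    · rw [show pvA_loop (l :: rest) d (some n) acc =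
        pvA_loop rest (d.insert n (PySem.Str.strip (PySem.Str.join "\n" acc)))
          (some (PySem.Str.lower (PySem.Str.strip (PySem.Str.slice l (some 2) none)))) []
        from by simp [pvA_loop, PySem.Str.startswith_eq, h]]
      rw [ih]
      simp [List.dropWhile, List.takeWhile, h, pvB_go, pvTakeBlock_eq]
    · rw [show pvA_loop (l :: rest) d (some n) acc =
        pvA_loop rest d (some n) (acc ++ [l]) from by simp [pvA_loop, PySem.Str.startswith_eq, h]]
      rw [ih]
      simp [List.dropWhile, List.takeWhile, h]

-- A's loop with no pending name equals B's loop on the remainder after the prologue.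
theorem pvA_loop_none (ls : List String) : ∀ (d : PySem.Dict String String)
    (acc : List String),
    pvA_loop ls d none acc =
      pvB_go (ls.dropWhile (fun l => !(PySem.Str.startswith l "# "))) d := by
  induction ls with
  | nil => intro d acc; simp [pvA_loop, pvB_go]
  | cons l rest ih =>
    intro d acc
    by_cases h : PySem.Chars.startswith l.toList ['#', ' '] = true
    · rw [show pvA_loop (l :: rest) d none acc =
        pvA_loop rest d
          (some (PySem.Str.lower (PySem.Str.strip (PySem.Str.slice l (some 2) none)))) []
        from by simp [pvA_loop, PySem.Str.startswith_eq, h]]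
      rw [pvA_loop_some]
      simp [List.dropWhile, h, pvB_go, pvTakeBlock_eq]
    · rw [show pvA_loop (l :: rest) d none acc =
        pvA_loop rest d none (acc ++ [l]) from by simp [pvA_loop, PySem.Str.startswith_eq, h]]
      rw [ih]
      simp [List.dropWhile, h]

-- ===== VERDICT (by name: the statement is the Claim_ definition above) =====
theorem parse_section_blocks_spec : Claim_equal_parse_section_blocks := by
  intro body _
  unfold Spec_parse_section_blocks parse_section_blocks parse_section_blocks_alt
  rw [pvA_loop_none, pvSkipPrologue_eq]
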